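-- pv_equiv track=rewrite | github.com/DoubleDi/python_projects | symmetric_line/symmetric_line.py | f
-- ===== SOURCE A (Python) =====
-- from typing import List, Tuple
--
-- def f(a: List[Tuple[int, int]]) -> bool:
--     if not len(a):
--         return False
--
--     minx = min(x for (x, y) in a)
--     maxx = max(x for (x, y) in a)
--
--     result = {}
--     for x, y in a:
--         b = -1
--         r = x - minx
--         if maxx - x == r:
--             b = 0
--         if maxx - x < r:
--             b = 1
--             r = maxx - x
--
--         if (r, y) in result:
--             result[(r, y)] += b
--         else:
--             result[(r, y)] = b
--
--     for v in result.values():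
--         if v != 0:
--             return False
--
--     return True
-- ===== SOURCE B (Python) =====
-- def f(a):
--     if not a:
--         return False
--     s = min(x for x, y in a) + max(x for x, y in a)
--     cnt = {}
--     for p in a:
--         cnt[p] = cnt.get(p, 0) + 1
--     return all(cnt.get((s - x, y), 0) == c for (x, y), c in cnt.items())
-- ===== Notes on version B (the rewrite author's own statement) =====
-- stated objective: alternative
-- what changed: Instead of bucketing points by their edge distance min(x-minx, maxx-x) and cancelling signed left/right counts in a dict, B builds a plain frequency counter of the points and checks that each point's multiplicity equals the multiplicity of its mirror image across the axis s = minx + maxx.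
import Mathlib
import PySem

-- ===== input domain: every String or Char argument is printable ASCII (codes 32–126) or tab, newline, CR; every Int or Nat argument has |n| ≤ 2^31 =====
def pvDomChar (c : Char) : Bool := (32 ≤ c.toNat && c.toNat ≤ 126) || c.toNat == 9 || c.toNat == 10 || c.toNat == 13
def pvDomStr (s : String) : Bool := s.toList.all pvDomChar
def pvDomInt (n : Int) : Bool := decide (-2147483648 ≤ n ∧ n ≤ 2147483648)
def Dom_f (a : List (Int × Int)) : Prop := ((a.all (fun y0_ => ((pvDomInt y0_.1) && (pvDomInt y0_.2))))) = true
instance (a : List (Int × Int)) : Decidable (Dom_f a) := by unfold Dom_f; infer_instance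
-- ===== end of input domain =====

-- B checks vertical-line symmetry by comparing each point's multiplicity with its mirror image's
-- across the axis s = minx + maxx (a frequency counter), instead of A's signed edge-distance buckets.

-- ===== PORT A =====
def f (a : List (Int × Int)) : Bool :=
  if a.length = 0 then false
  else
    match PySem.List.min? (a.map Prod.fst) (fun x => x),
          PySem.List.max? (a.map Prod.fst) (fun x => x) with
    | some minx, some maxx =>
      let result : PySem.Dict (Int × Int) Int :=
        a.foldl (fun d p =>
          let b0 : Int := -1
          let r0 : Int := p.1 - minx
          let b1 : Int := if maxx - p.1 = r0 then 0 else b0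
          let b  : Int := if maxx - p.1 < r0 then 1 else b1
          let r  : Int := if maxx - p.1 < r0 then maxx - p.1 else r0
          match d.get? (r, p.2) with
          | some v => d.insert (r, p.2) (v + b)
          | none   => d.insert (r, p.2) b) PySem.Dict.empty
      result.values.all (fun v => v == 0)
    | _, _ => false

-- ===== PORT B =====
def f_alt (a : List (Int × Int)) : Bool :=
  if a.length = 0 then false
  else
    match PySem.List.min? (a.map Prod.fst) (fun x => x) with
    | none => false
    | some minx =>
      match PySem.List.max? (a.map Prod.fst) (fun x => x) with
      | none => false
      | some maxx =>
        let s : Int := minx + maxx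
        let cnt : PySem.Dict (Int × Int) Int :=
          a.foldl (fun d p => d.insert p (d.getD p 0 + 1)) PySem.Dict.empty
        cnt.items.all (fun kv => cnt.getD (s - kv.1.1, kv.1.2) 0 == kv.2)

-- ===== PRECONDITION & SPEC =====
def Spec_f (a : List (Int × Int)) (out : Bool) : Prop := out = f_alt a
instance (a : List (Int × Int)) (out : Bool) : Decidable (Spec_f a out) := by unfold Spec_f; infer_instance

-- ===== CLAIM (what is proved, stated in full; the proofs are below) =====
def Claim_equal_f : Prop := ∀ (a : List (Int × Int)), Dom_f a → Spec_f a (f a)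

-- ===== LEMMAS AND PROOFS =====

-- A's bucket key: (edge distance, y)
def keyf (mn mx : Int) (p : Int × Int) : Int × Int :=
  (if mx - p.1 < p.1 - mn then mx - p.1 else p.1 - mn, p.2)

-- A's signed weight: +1 right of the axis, 0 on it, -1 left of it
def bf (mn mx : Int) (p : Int × Int) : Int :=
  if mx - p.1 < p.1 - mn then 1 else if mx - p.1 = p.1 - mn then 0 else -1

-- the signed total A accumulates in bucket k
def Ssum (mn mx : Int) (a : List (Int × Int)) (k : Int × Int) : Int :=
  ((a.filter (fun p => keyf mn mx p == k)).map (bf mn mx)).sum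

-- A's fold step is an insert of (old value + weight)
lemma stepA_eq (mn mx : Int) (d : PySem.Dict (Int × Int) Int) (p : Int × Int) :
    (let b0 : Int := -1
     let r0 : Int := p.1 - mn
     let b1 : Int := if mx - p.1 = r0 then 0 else b0
     let b  : Int := if mx - p.1 < r0 then 1 else b1
     let r  : Int := if mx - p.1 < r0 then mx - p.1 else r0
     match d.get? (r, p.2) with
     | some v => d.insert (r, p.2) (v + b)
     | none   => d.insert (r, p.2) b)
    = d.insert (keyf mn mx p) (d.getD (keyf mn mx p) 0 + bf mn mx p) := by
  simp only [keyf, bf]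
  cases h : d.get? (if mx - p.1 < p.1 - mn then mx - p.1 else p.1 - mn, p.2) with
  | none => simp [PySem.Dict.getD_eq_get?_getD, h]
  | some v => simp [PySem.Dict.getD_eq_get?_getD, h]

-- the fold's lookup at k is the signed bucket total
lemma getD_foldA (mn mx : Int) (a : List (Int × Int)) (d : PySem.Dict (Int × Int) Int)
    (k : Int × Int) :
    (a.foldl (fun d p => d.insert (keyf mn mx p) (d.getD (keyf mn mx p) 0 + bf mn mx p)) d).getD k 0
      = d.getD k 0 + Ssum mn mx a k := by
  induction a generalizing d with
  | nil => simp [Ssum]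
  | cons q t ih =>
      simp only [List.foldl_cons, ih, Ssum, List.filter_cons]
      by_cases hq : keyf mn mx q = k
      · simp [hq]; ring
      · have hf : (keyf mn mx q == k) = false := by simp [hq]
        simp only [hf, Bool.false_eq_true, if_false, PySem.Dict.getD_insert,
          if_neg (fun h : k = keyf mn mx q => hq h.symm)]

-- a bucket whose members all weigh 0 totals 0
lemma Ssum_zero (mn mx : Int) (a : List (Int × Int)) (k : Int × Int)
    (h : ∀ q ∈ a, keyf mn mx q = k → bf mn mx q = 0) : Ssum mn mx a k = 0 := by
  apply List.sum_eq_zero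
  intro v hv
  rcases List.mem_map.1 hv with ⟨q, hq, rfl⟩
  rcases List.mem_filter.1 hq with ⟨hqa, hqk⟩
  exact h q hqa (by simpa using hqk)


-- one element's contribution to an off-axis bucket (r, y), written with indicator counts
lemma point_val (mn mx r y : Int) (q : Int × Int) (hq : mn ≤ q.1 ∧ q.1 ≤ mx)
    (hlt : mn + r < mx - r) :
    (if keyf mn mx q = (r, y) then bf mn mx q else 0)
      = (if q = (mx - r, y) then (1 : Int) else 0) - (if q = (mn + r, y) then 1 else 0) := by
  obtain ⟨x, z⟩ := q
  simp only [keyf, bf, Prod.mk.injEq] at *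
  split_ifs <;> omega

lemma Ssum_cons (mn mx : Int) (q : Int × Int) (t : List (Int × Int)) (k : Int × Int) :
    Ssum mn mx (q :: t) k = (if keyf mn mx q = k then bf mn mx q else 0) + Ssum mn mx t k := by
  by_cases h : keyf mn mx q = k <;> simp [Ssum, h]

-- off-axis bucket (r, y): signed total = (#points at maxx - r) − (#points at minx + r)
lemma Ssum_split (mn mx : Int) (a : List (Int × Int)) (r y : Int)
    (hb : ∀ q ∈ a, mn ≤ q.1 ∧ q.1 ≤ mx) (hlt : mn + r < mx - r) :
    Ssum mn mx a (r, y) = (a.count (mx - r, y) : Int) - (a.count (mn + r, y) : Int) := by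
  induction a with
  | nil => simp [Ssum]
  | cons q t ih =>
      have hbq := hb q (by simp)
      have hbt : ∀ x ∈ t, mn ≤ x.1 ∧ x.1 ≤ mx := fun x hx => hb x (by simp [hx])
      rw [Ssum_cons, point_val mn mx r y q hbq hlt, ih hbt]
      by_cases h1 : q = (mx - r, y) <;> by_cases h2 : q = (mn + r, y) <;>
        simp [List.count_cons, h1, h2] <;> omega

-- per point of the list: A's bucket total vanishes iff the mirror count matches
lemma per_point (mn mx : Int) (a : List (Int × Int)) (x y : Int)
    (hb : ∀ q ∈ a, mn ≤ q.1 ∧ q.1 ≤ mx) (hp : (x, y) ∈ a) :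
    (Ssum mn mx a (keyf mn mx (x, y)) = 0)
      ↔ (a.count (mn + mx - x, y) : Int) = (a.count (x, y) : Int) := by
  have hbx := hb (x, y) hp
  rcases lt_trichotomy (x - mn) (mx - x) with hlt | heq | hgt
  · -- x is left of the axis
    have hk : keyf mn mx (x, y) = (x - mn, y) := by
      simp only [keyf]; rw [if_neg (by omega)]
    rw [hk, Ssum_split mn mx a (x - mn) y hb (by omega)]
    have h1 : mx - (x - mn) = mn + mx - x := by ring
    have h2 : mn + (x - mn) = x := by ring
    rw [h1, h2]
    omega
  · -- x is on the axis
    constructor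
    · intro _
      have : mn + mx - x = x := by omega
      rw [this]
    · intro _
      apply Ssum_zero
      intro q hqa hqk
      have hbq := hb q hqa
      obtain ⟨u, v⟩ := q
      simp only [keyf, Prod.mk.injEq] at hqk
      simp only [bf]
      rw [if_neg (by omega), if_pos (by omega)]
  · -- x is right of the axis
    have hk : keyf mn mx (x, y) = (mx - x, y) := by
      simp only [keyf]; rw [if_pos (by omega)]
    rw [hk, Ssum_split mn mx a (mx - x) y hb (by omega)]
    have h1 : mx - (mx - x) = x := by ring
    have h2 : mn + (mx - x) = mn + mx - x := by ring
    rw [h1, h2]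
    omega

-- A's verdict as a Prop over the points
lemma f_eq_true_iff (a : List (Int × Int)) (mn mx : Int)
    (h1 : PySem.List.min? (a.map Prod.fst) (fun x => x) = some mn)
    (h2 : PySem.List.max? (a.map Prod.fst) (fun x => x) = some mx)
    (hne : ¬ a.length = 0) :
    (f a = true) ↔ ∀ p ∈ a, Ssum mn mx a (keyf mn mx p) = 0 := by
  have hstep : (fun (d : PySem.Dict (Int × Int) Int) (p : Int × Int) =>
      let b0 : Int := -1
      let r0 : Int := p.1 - mn
      let b1 : Int := if mx - p.1 = r0 then 0 else b0
      let b  : Int := if mx - p.1 < r0 then 1 else b1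
      let r  : Int := if mx - p.1 < r0 then mx - p.1 else r0
      match d.get? (r, p.2) with
      | some v => d.insert (r, p.2) (v + b)
      | none   => d.insert (r, p.2) b)
      = (fun d p => d.insert (keyf mn mx p) (d.getD (keyf mn mx p) 0 + bf mn mx p)) :=
    funext fun d => funext fun p => stepA_eq mn mx d p
  rw [f, if_neg hne]
  simp only [h1, h2]
  rw [hstep]
  set R := a.foldl (fun d p => d.insert (keyf mn mx p) (d.getD (keyf mn mx p) 0 + bf mn mx p))
    PySem.Dict.empty with hR
  have hnd : R.keys.Nodup := by
    rw [hR]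
    exact PySem.Dict.nodup_keys_foldl_insert_key a (keyf mn mx) _ _ PySem.Dict.nodup_keys_empty
  have hkeys : R.keys = PySem.Set.ofList (a.map (keyf mn mx)) := by
    rw [hR, PySem.Dict.keys_foldl_insert_key]
    simp [PySem.Dict.keys_empty, PySem.Set.update_nil_left]
  rw [PySem.Dict.values_eq_map_keys R hnd 0]
  rw [List.all_map, List.all_eq_true]
  constructor
  · intro h p hp
    have hk : keyf mn mx p ∈ R.keys := by
      rw [hkeys, PySem.Set.mem_ofList]
      exact List.mem_map_of_mem hp
    have := h _ hk
    simp only [Function.comp] at this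
    rw [hR, getD_foldA, PySem.Dict.getD_empty] at this
    simpa using this
  · intro h k hk
    rw [hkeys, PySem.Set.mem_ofList, List.mem_map] at hk
    rcases hk with ⟨p, hp, rfl⟩
    simp only [Function.comp]
    rw [hR, getD_foldA, PySem.Dict.getD_empty]
    simpa using h p hp

-- B's verdict as a Prop over the points
lemma f_alt_eq_true_iff (a : List (Int × Int)) (mn mx : Int)
    (h1 : PySem.List.min? (a.map Prod.fst) (fun x => x) = some mn)
    (h2 : PySem.List.max? (a.map Prod.fst) (fun x => x) = some mx)
    (hne : ¬ a.length = 0) :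
    (f_alt a = true) ↔ ∀ p ∈ a, a.count (mn + mx - p.1, p.2) = a.count p := by
  rw [f_alt, if_neg hne]
  simp only [h1, h2]
  simp only [PySem.Dict.foldl_insert_getD_add_one_eq_counter,
    PySem.Dict.items_counter, List.all_map, List.all_eq_true]
  constructor
  · intro h p hp
    have := h p ((PySem.Set.mem_ofList _ _).2 hp)
    simp only [Function.comp, PySem.Dict.getD_counter, beq_iff_eq] at this
    exact_mod_cast this
  · intro h k hk
    have := h k ((PySem.Set.mem_ofList _ _).1 hk)
    simp only [Function.comp, PySem.Dict.getD_counter, beq_iff_eq]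
    exact_mod_cast this

-- ===== VERDICT (by name: the statement is the Claim_ definition above) =====
theorem f_spec : Claim_equal_f := by
  intro a _
  unfold Spec_f
  by_cases hne : a.length = 0
  · have : a = [] := List.length_eq_zero_iff.1 hne
    subst this
    rfl
  · have hxs : a.map Prod.fst ≠ [] := by
      intro h; exact hne (by simpa using congrArg List.length h)
    rcases h1 : PySem.List.min? (a.map Prod.fst) (fun x => x) with _ | mn
    · exact absurd ((PySem.List.min?_eq_none_iff _ _).1 h1) hxs
    rcases h2 : PySem.List.max? (a.map Prod.fst) (fun x => x) with _ | mx
    · exact absurd ((PySem.List.max?_eq_none_iff _ _).1 h2) hxs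
    have hb : ∀ q ∈ a, mn ≤ q.1 ∧ q.1 ≤ mx := by
      intro q hq
      have hm : q.1 ∈ a.map Prod.fst := List.mem_map_of_mem hq
      exact ⟨PySem.List.min?_isMin h1 _ hm, PySem.List.max?_isMax h2 _ hm⟩
    have hiff : (f a = true) ↔ (f_alt a = true) := by
      rw [f_eq_true_iff a mn mx h1 h2 hne, f_alt_eq_true_iff a mn mx h1 h2 hne]
      constructor
      · intro h p hp
        obtain ⟨x, y⟩ := p
        exact_mod_cast (per_point mn mx a x y hb hp).1 (h _ hp)
      · intro h p hp
        obtain ⟨x, y⟩ := p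
        exact (per_point mn mx a x y hb hp).2 (by exact_mod_cast h _ hp)
    rcases Bool.eq_false_or_eq_true (f_alt a) with hfa | hfa <;>
      rcases Bool.eq_false_or_eq_true (f a) with hf | hf <;>
      simp_all
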